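-- pv_equiv track=rewrite | github.com/mohsen6-3/DevNest | DevNest/recognition/models.py | score_to_title
-- ===== SOURCE A (Python) =====
-- TITLE_TIERS = [
--     (0,    "New Member"),
--     (5,    "Explorer"),
--     (15,   "Contributor"),
--     (30,   "Active Contributor"),
--     (50,   "Engaged Member"),
--     (75,   "Top Contributor"),
--     (100,  "Advanced Contributor"),
--     (150,  "Core Member"),
--     (200,  "Mentor"),
--     (300,  "Senior Mentor"),
--     (450,  "Knowledge Leader"),
--     (600,  "Nest Expert"),
--     (800,  "Master Contributor"),
--     (1000, "Pillar of the Nest"),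
-- ]
--
-- def score_to_title(score: int) -> str:
--     """Return the highest title tier the score qualifies for."""
--     title = TITLE_TIERS[0][1]
--     for threshold, name in TITLE_TIERS:
--         if score >= threshold:
--             title = name
--         else:
--             break
--     return title
-- ===== SOURCE B (Python) =====
-- import bisect
--
-- TITLE_TIERS = [
--     (0,    "New Member"),
--     (5,    "Explorer"),
--     (15,   "Contributor"),
--     (30,   "Active Contributor"),
--     (50,   "Engaged Member"),
--     (75,   "Top Contributor"),
--     (100,  "Advanced Contributor"),
--     (150,  "Core Member"),
--     (200,  "Mentor"),
--     (300,  "Senior Mentor"),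
--     (450,  "Knowledge Leader"),
--     (600,  "Nest Expert"),
--     (800,  "Master Contributor"),
--     (1000, "Pillar of the Nest"),
-- ]
--
-- _THRESHOLDS = [t for t, _ in TITLE_TIERS]
--
--
-- def score_to_title(score: int) -> str:
--     """Return the highest title tier the score qualifies for (binary search)."""
--     idx = bisect.bisect_right(_THRESHOLDS, score) - 1
--     return TITLE_TIERS[max(idx, 0)][1]
-- ===== Notes on version B (the rewrite author's own statement) =====
-- stated objective: idiomatic
-- what changed: Replaced the linear accumulate-and-break scan over TITLE_TIERS with a bisect.bisect_right binary search on a precomputed threshold list, clamping the resulting index so sub-threshold scores still map to the lowest tier.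
import Mathlib
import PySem

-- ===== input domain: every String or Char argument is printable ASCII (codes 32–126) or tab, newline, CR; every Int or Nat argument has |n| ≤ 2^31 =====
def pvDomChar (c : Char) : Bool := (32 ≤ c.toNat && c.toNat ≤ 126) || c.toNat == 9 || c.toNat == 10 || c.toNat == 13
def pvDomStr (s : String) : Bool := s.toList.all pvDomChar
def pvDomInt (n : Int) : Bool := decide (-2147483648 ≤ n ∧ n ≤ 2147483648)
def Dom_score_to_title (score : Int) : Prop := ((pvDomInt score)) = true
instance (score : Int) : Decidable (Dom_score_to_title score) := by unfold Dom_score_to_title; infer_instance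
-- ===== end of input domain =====

-- B replaces A's linear accumulate-and-break scan with a bisect_right binary search (clamped to index 0); idiomatic, same results.
-- ===== PORT A =====
def TITLE_TIERS : List (Int × String) :=
  [(0, "New Member"), (5, "Explorer"), (15, "Contributor"), (30, "Active Contributor"),
   (50, "Engaged Member"), (75, "Top Contributor"), (100, "Advanced Contributor"),
   (150, "Core Member"), (200, "Mentor"), (300, "Senior Mentor"), (450, "Knowledge Leader"),
   (600, "Nest Expert"), (800, "Master Contributor"), (1000, "Pillar of the Nest")]

-- A's for-loop with break: carries the current title, stops at the first failing threshold
def aLoop (score : Int) (title : String) : List (Int × String) → String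
  | [] => title
  | (t, n) :: rest => if score ≥ t then aLoop score n rest else title

def score_to_title (score : Int) : String :=
  let title := ((PySem.List.pyGet? TITLE_TIERS 0).getD (0, "")).2
  aLoop score title TITLE_TIERS

-- ===== PORT B =====
def THRESHOLDS : List Int := TITLE_TIERS.map Prod.fst

def score_to_title_alt (score : Int) : String :=
  let idx : Int := (PySem.List.bisectRight THRESHOLDS score : Int) - 1
  ((PySem.List.pyGet? TITLE_TIERS (max idx 0)).getD (0, "")).2

-- ===== PRECONDITION & SPEC =====
def Spec_score_to_title (score : Int) (out : String) : Prop := out = score_to_title_alt score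
instance (score : Int) (out : String) : Decidable (Spec_score_to_title score out) := by unfold Spec_score_to_title; infer_instance

-- ===== CLAIM (what is proved, stated in full; the proofs are below) =====
def Claim_equal_score_to_title : Prop := ∀ (score : Int), Dom_score_to_title score → Spec_score_to_title score (score_to_title score)

-- ===== LEMMAS AND PROOFS =====
-- pin the value of the binary search from PySem's bisectRight_spec
lemma len_TH : THRESHOLDS.length = 14 := by decide

lemma bisect_val (s : Int) (k : Nat) (hk : k ≤ THRESHOLDS.length)
    (hlo : ∀ j (hj : j < THRESHOLDS.length), j < k → THRESHOLDS[j] ≤ s)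
    (hhi : ∀ j (hj : j < THRESHOLDS.length), k ≤ j → s < THRESHOLDS[j]) :
    PySem.List.bisectRight THRESHOLDS s = k := by
  obtain ⟨h1, h2, h3⟩ := PySem.List.bisectRight_spec THRESHOLDS s (by decide)
  by_contra hne
  rcases Nat.lt_or_ge (PySem.List.bisectRight THRESHOLDS s) k with h | h
  · exact absurd (hlo _ (by omega) h) (not_le.mpr (h3 _ (by omega) le_rfl))
  · have hk2 : k < PySem.List.bisectRight THRESHOLDS s := by omega
    exact absurd (h2 k (by omega) hk2) (not_le.mpr (hhi k (by omega) le_rfl))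

lemma alt_neg (s : Int) (hhi0 : s < 0) : score_to_title_alt s = "New Member" := by
  have hb : PySem.List.bisectRight THRESHOLDS s = 0 := bisect_val s 0 (by decide) (by intro j hj hjk; omega) (by intro j hj hjk; rw [len_TH] at hj; interval_cases j <;> simp only [THRESHOLDS, TITLE_TIERS, List.map, List.getElem_cons_zero, List.getElem_cons_succ] <;> omega)
  simp only [score_to_title_alt, hb]
  decide

lemma alt_0 (s : Int) (hlo0 : 0 ≤ s) (hhi0 : s < 5) : score_to_title_alt s = "New Member" := by
  have hb : PySem.List.bisectRight THRESHOLDS s = 1 := bisect_val s 1 (by decide) (by intro j hj hjk; rw [len_TH] at hj; interval_cases j <;> simp only [THRESHOLDS, TITLE_TIERS, List.map, List.getElem_cons_zero, List.getElem_cons_succ] <;> omega) (by intro j hj hjk; rw [len_TH] at hj; interval_cases j <;> simp only [THRESHOLDS, TITLE_TIERS, List.map, List.getElem_cons_zero, List.getElem_cons_succ] <;> omega)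
  simp only [score_to_title_alt, hb]
  decide

lemma alt_1 (s : Int) (hlo0 : 5 ≤ s) (hhi0 : s < 15) : score_to_title_alt s = "Explorer" := by
  have hb : PySem.List.bisectRight THRESHOLDS s = 2 := bisect_val s 2 (by decide) (by intro j hj hjk; rw [len_TH] at hj; interval_cases j <;> simp only [THRESHOLDS, TITLE_TIERS, List.map, List.getElem_cons_zero, List.getElem_cons_succ] <;> omega) (by intro j hj hjk; rw [len_TH] at hj; interval_cases j <;> simp only [THRESHOLDS, TITLE_TIERS, List.map, List.getElem_cons_zero, List.getElem_cons_succ] <;> omega)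
  simp only [score_to_title_alt, hb]
  decide

lemma alt_2 (s : Int) (hlo0 : 15 ≤ s) (hhi0 : s < 30) : score_to_title_alt s = "Contributor" := by
  have hb : PySem.List.bisectRight THRESHOLDS s = 3 := bisect_val s 3 (by decide) (by intro j hj hjk; rw [len_TH] at hj; interval_cases j <;> simp only [THRESHOLDS, TITLE_TIERS, List.map, List.getElem_cons_zero, List.getElem_cons_succ] <;> omega) (by intro j hj hjk; rw [len_TH] at hj; interval_cases j <;> simp only [THRESHOLDS, TITLE_TIERS, List.map, List.getElem_cons_zero, List.getElem_cons_succ] <;> omega)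
  simp only [score_to_title_alt, hb]
  decide

lemma alt_3 (s : Int) (hlo0 : 30 ≤ s) (hhi0 : s < 50) : score_to_title_alt s = "Active Contributor" := by
  have hb : PySem.List.bisectRight THRESHOLDS s = 4 := bisect_val s 4 (by decide) (by intro j hj hjk; rw [len_TH] at hj; interval_cases j <;> simp only [THRESHOLDS, TITLE_TIERS, List.map, List.getElem_cons_zero, List.getElem_cons_succ] <;> omega) (by intro j hj hjk; rw [len_TH] at hj; interval_cases j <;> simp only [THRESHOLDS, TITLE_TIERS, List.map, List.getElem_cons_zero, List.getElem_cons_succ] <;> omega)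
  simp only [score_to_title_alt, hb]
  decide

lemma alt_4 (s : Int) (hlo0 : 50 ≤ s) (hhi0 : s < 75) : score_to_title_alt s = "Engaged Member" := by
  have hb : PySem.List.bisectRight THRESHOLDS s = 5 := bisect_val s 5 (by decide) (by intro j hj hjk; rw [len_TH] at hj; interval_cases j <;> simp only [THRESHOLDS, TITLE_TIERS, List.map, List.getElem_cons_zero, List.getElem_cons_succ] <;> omega) (by intro j hj hjk; rw [len_TH] at hj; interval_cases j <;> simp only [THRESHOLDS, TITLE_TIERS, List.map, List.getElem_cons_zero, List.getElem_cons_succ] <;> omega)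
  simp only [score_to_title_alt, hb]
  decide

lemma alt_5 (s : Int) (hlo0 : 75 ≤ s) (hhi0 : s < 100) : score_to_title_alt s = "Top Contributor" := by
  have hb : PySem.List.bisectRight THRESHOLDS s = 6 := bisect_val s 6 (by decide) (by intro j hj hjk; rw [len_TH] at hj; interval_cases j <;> simp only [THRESHOLDS, TITLE_TIERS, List.map, List.getElem_cons_zero, List.getElem_cons_succ] <;> omega) (by intro j hj hjk; rw [len_TH] at hj; interval_cases j <;> simp only [THRESHOLDS, TITLE_TIERS, List.map, List.getElem_cons_zero, List.getElem_cons_succ] <;> omega)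
  simp only [score_to_title_alt, hb]
  decide

lemma alt_6 (s : Int) (hlo0 : 100 ≤ s) (hhi0 : s < 150) : score_to_title_alt s = "Advanced Contributor" := by
  have hb : PySem.List.bisectRight THRESHOLDS s = 7 := bisect_val s 7 (by decide) (by intro j hj hjk; rw [len_TH] at hj; interval_cases j <;> simp only [THRESHOLDS, TITLE_TIERS, List.map, List.getElem_cons_zero, List.getElem_cons_succ] <;> omega) (by intro j hj hjk; rw [len_TH] at hj; interval_cases j <;> simp only [THRESHOLDS, TITLE_TIERS, List.map, List.getElem_cons_zero, List.getElem_cons_succ] <;> omega)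
  simp only [score_to_title_alt, hb]
  decide

lemma alt_7 (s : Int) (hlo0 : 150 ≤ s) (hhi0 : s < 200) : score_to_title_alt s = "Core Member" := by
  have hb : PySem.List.bisectRight THRESHOLDS s = 8 := bisect_val s 8 (by decide) (by intro j hj hjk; rw [len_TH] at hj; interval_cases j <;> simp only [THRESHOLDS, TITLE_TIERS, List.map, List.getElem_cons_zero, List.getElem_cons_succ] <;> omega) (by intro j hj hjk; rw [len_TH] at hj; interval_cases j <;> simp only [THRESHOLDS, TITLE_TIERS, List.map, List.getElem_cons_zero, List.getElem_cons_succ] <;> omega)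
  simp only [score_to_title_alt, hb]
  decide

lemma alt_8 (s : Int) (hlo0 : 200 ≤ s) (hhi0 : s < 300) : score_to_title_alt s = "Mentor" := by
  have hb : PySem.List.bisectRight THRESHOLDS s = 9 := bisect_val s 9 (by decide) (by intro j hj hjk; rw [len_TH] at hj; interval_cases j <;> simp only [THRESHOLDS, TITLE_TIERS, List.map, List.getElem_cons_zero, List.getElem_cons_succ] <;> omega) (by intro j hj hjk; rw [len_TH] at hj; interval_cases j <;> simp only [THRESHOLDS, TITLE_TIERS, List.map, List.getElem_cons_zero, List.getElem_cons_succ] <;> omega)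
  simp only [score_to_title_alt, hb]
  decide

lemma alt_9 (s : Int) (hlo0 : 300 ≤ s) (hhi0 : s < 450) : score_to_title_alt s = "Senior Mentor" := by
  have hb : PySem.List.bisectRight THRESHOLDS s = 10 := bisect_val s 10 (by decide) (by intro j hj hjk; rw [len_TH] at hj; interval_cases j <;> simp only [THRESHOLDS, TITLE_TIERS, List.map, List.getElem_cons_zero, List.getElem_cons_succ] <;> omega) (by intro j hj hjk; rw [len_TH] at hj; interval_cases j <;> simp only [THRESHOLDS, TITLE_TIERS, List.map, List.getElem_cons_zero, List.getElem_cons_succ] <;> omega)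
  simp only [score_to_title_alt, hb]
  decide

lemma alt_10 (s : Int) (hlo0 : 450 ≤ s) (hhi0 : s < 600) : score_to_title_alt s = "Knowledge Leader" := by
  have hb : PySem.List.bisectRight THRESHOLDS s = 11 := bisect_val s 11 (by decide) (by intro j hj hjk; rw [len_TH] at hj; interval_cases j <;> simp only [THRESHOLDS, TITLE_TIERS, List.map, List.getElem_cons_zero, List.getElem_cons_succ] <;> omega) (by intro j hj hjk; rw [len_TH] at hj; interval_cases j <;> simp only [THRESHOLDS, TITLE_TIERS, List.map, List.getElem_cons_zero, List.getElem_cons_succ] <;> omega)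
  simp only [score_to_title_alt, hb]
  decide

lemma alt_11 (s : Int) (hlo0 : 600 ≤ s) (hhi0 : s < 800) : score_to_title_alt s = "Nest Expert" := by
  have hb : PySem.List.bisectRight THRESHOLDS s = 12 := bisect_val s 12 (by decide) (by intro j hj hjk; rw [len_TH] at hj; interval_cases j <;> simp only [THRESHOLDS, TITLE_TIERS, List.map, List.getElem_cons_zero, List.getElem_cons_succ] <;> omega) (by intro j hj hjk; rw [len_TH] at hj; interval_cases j <;> simp only [THRESHOLDS, TITLE_TIERS, List.map, List.getElem_cons_zero, List.getElem_cons_succ] <;> omega)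
  simp only [score_to_title_alt, hb]
  decide

lemma alt_12 (s : Int) (hlo0 : 800 ≤ s) (hhi0 : s < 1000) : score_to_title_alt s = "Master Contributor" := by
  have hb : PySem.List.bisectRight THRESHOLDS s = 13 := bisect_val s 13 (by decide) (by intro j hj hjk; rw [len_TH] at hj; interval_cases j <;> simp only [THRESHOLDS, TITLE_TIERS, List.map, List.getElem_cons_zero, List.getElem_cons_succ] <;> omega) (by intro j hj hjk; rw [len_TH] at hj; interval_cases j <;> simp only [THRESHOLDS, TITLE_TIERS, List.map, List.getElem_cons_zero, List.getElem_cons_succ] <;> omega)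
  simp only [score_to_title_alt, hb]
  decide

lemma alt_13 (s : Int) (hlo0 : 1000 ≤ s) : score_to_title_alt s = "Pillar of the Nest" := by
  have hb : PySem.List.bisectRight THRESHOLDS s = 14 := bisect_val s 14 (by decide) (by intro j hj hjk; rw [len_TH] at hj; interval_cases j <;> simp only [THRESHOLDS, TITLE_TIERS, List.map, List.getElem_cons_zero, List.getElem_cons_succ] <;> omega) (by intro j hj hjk; rw [len_TH] at hj; omega)
  simp only [score_to_title_alt, hb]
  decide


-- ===== VERDICT (by name: the statement is the Claim_ definition above) =====
theorem score_to_title_spec : Claim_equal_score_to_title := by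
  intro s _
  unfold Spec_score_to_title
  by_cases c0 : s < 0
  · rw [alt_neg s c0]
    simp only [score_to_title, TITLE_TIERS, aLoop]
    rw [if_neg (by omega)]
    decide
  by_cases c1 : s < 5
  · rw [alt_0 s (by omega) c1]
    simp only [score_to_title, TITLE_TIERS, aLoop]
    rw [if_pos (by omega), if_neg (by omega)]
  by_cases c2 : s < 15
  · rw [alt_1 s (by omega) c2]
    simp only [score_to_title, TITLE_TIERS, aLoop]
    rw [if_pos (by omega), if_pos (by omega), if_neg (by omega)]
  by_cases c3 : s < 30
  · rw [alt_2 s (by omega) c3]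
    simp only [score_to_title, TITLE_TIERS, aLoop]
    rw [if_pos (by omega), if_pos (by omega), if_pos (by omega), if_neg (by omega)]
  by_cases c4 : s < 50
  · rw [alt_3 s (by omega) c4]
    simp only [score_to_title, TITLE_TIERS, aLoop]
    rw [if_pos (by omega), if_pos (by omega), if_pos (by omega), if_pos (by omega), if_neg (by omega)]
  by_cases c5 : s < 75
  · rw [alt_4 s (by omega) c5]
    simp only [score_to_title, TITLE_TIERS, aLoop]
    rw [if_pos (by omega), if_pos (by omega), if_pos (by omega), if_pos (by omega), if_pos (by omega), if_neg (by omega)]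
  by_cases c6 : s < 100
  · rw [alt_5 s (by omega) c6]
    simp only [score_to_title, TITLE_TIERS, aLoop]
    rw [if_pos (by omega), if_pos (by omega), if_pos (by omega), if_pos (by omega), if_pos (by omega), if_pos (by omega), if_neg (by omega)]
  by_cases c7 : s < 150
  · rw [alt_6 s (by omega) c7]
    simp only [score_to_title, TITLE_TIERS, aLoop]
    rw [if_pos (by omega), if_pos (by omega), if_pos (by omega), if_pos (by omega), if_pos (by omega), if_pos (by omega), if_pos (by omega), if_neg (by omega)]
  by_cases c8 : s < 200
  · rw [alt_7 s (by omega) c8]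
    simp only [score_to_title, TITLE_TIERS, aLoop]
    rw [if_pos (by omega), if_pos (by omega), if_pos (by omega), if_pos (by omega), if_pos (by omega), if_pos (by omega), if_pos (by omega), if_pos (by omega), if_neg (by omega)]
  by_cases c9 : s < 300
  · rw [alt_8 s (by omega) c9]
    simp only [score_to_title, TITLE_TIERS, aLoop]
    rw [if_pos (by omega), if_pos (by omega), if_pos (by omega), if_pos (by omega), if_pos (by omega), if_pos (by omega), if_pos (by omega), if_pos (by omega), if_pos (by omega), if_neg (by omega)]
  by_cases c10 : s < 450
  · rw [alt_9 s (by omega) c10]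
    simp only [score_to_title, TITLE_TIERS, aLoop]
    rw [if_pos (by omega), if_pos (by omega), if_pos (by omega), if_pos (by omega), if_pos (by omega), if_pos (by omega), if_pos (by omega), if_pos (by omega), if_pos (by omega), if_pos (by omega), if_neg (by omega)]
  by_cases c11 : s < 600
  · rw [alt_10 s (by omega) c11]
    simp only [score_to_title, TITLE_TIERS, aLoop]
    rw [if_pos (by omega), if_pos (by omega), if_pos (by omega), if_pos (by omega), if_pos (by omega), if_pos (by omega), if_pos (by omega), if_pos (by omega), if_pos (by omega), if_pos (by omega), if_pos (by omega), if_neg (by omega)]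
  by_cases c12 : s < 800
  · rw [alt_11 s (by omega) c12]
    simp only [score_to_title, TITLE_TIERS, aLoop]
    rw [if_pos (by omega), if_pos (by omega), if_pos (by omega), if_pos (by omega), if_pos (by omega), if_pos (by omega), if_pos (by omega), if_pos (by omega), if_pos (by omega), if_pos (by omega), if_pos (by omega), if_pos (by omega), if_neg (by omega)]
  by_cases c13 : s < 1000
  · rw [alt_12 s (by omega) c13]
    simp only [score_to_title, TITLE_TIERS, aLoop]
    rw [if_pos (by omega), if_pos (by omega), if_pos (by omega), if_pos (by omega), if_pos (by omega), if_pos (by omega), if_pos (by omega), if_pos (by omega), if_pos (by omega), if_pos (by omega), if_pos (by omega), if_pos (by omega), if_pos (by omega), if_neg (by omega)]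
  rw [alt_13 s (by omega)]
  simp only [score_to_title, TITLE_TIERS, aLoop]
  rw [if_pos (by omega), if_pos (by omega), if_pos (by omega), if_pos (by omega), if_pos (by omega), if_pos (by omega), if_pos (by omega), if_pos (by omega), if_pos (by omega), if_pos (by omega), if_pos (by omega), if_pos (by omega), if_pos (by omega), if_pos (by omega)]
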